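-- pv_equiv track=rewrite | github.com/demeet2k/athena-square-earth | self_actualize/runtime/hemisphere_full_corpus_integration_support.py | note_primary_hemisphere
-- ===== SOURCE A (Python) =====
-- from collections import Counter, defaultdict
-- from typing import Any
--
-- def note_primary_hemisphere(records: list[dict[str, Any]]) -> str:
--     hemispheres = [
--         record.get("primary_hemisphere", "")
--         for record in records
--         if record.get("primary_hemisphere")
--     ]
--     if not hemispheres:
--         return "MATH"
--     return Counter(hemispheres).most_common(1)[0][0]
-- ===== SOURCE B (Python) =====
-- def note_primary_hemisphere(records):
--     hems = []
--     for record in records: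
--         h = record.get("primary_hemisphere", "")
--         if h:
--             hems.append(h)
--     best, best_count = "MATH", 0
--     for i, h in enumerate(hems):
--         if h not in hems[:i]:
--             c = hems.count(h)
--             if c > best_count:
--                 best, best_count = h, c
--     return best
-- ===== Notes on version B (the rewrite author's own statement) =====
-- stated objective: alternative
-- what changed: Dropped Counter and dicts entirely: B collects the non-empty hemispheres into a list, then for each position that is a first occurrence (no earlier equal element in the prefix) it counts that value with list.count and keeps a strict-'>' running best, so ties still resolve to the first-encountered value; a hash-based counter is replaced by nested list scans.
import Mathlib
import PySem

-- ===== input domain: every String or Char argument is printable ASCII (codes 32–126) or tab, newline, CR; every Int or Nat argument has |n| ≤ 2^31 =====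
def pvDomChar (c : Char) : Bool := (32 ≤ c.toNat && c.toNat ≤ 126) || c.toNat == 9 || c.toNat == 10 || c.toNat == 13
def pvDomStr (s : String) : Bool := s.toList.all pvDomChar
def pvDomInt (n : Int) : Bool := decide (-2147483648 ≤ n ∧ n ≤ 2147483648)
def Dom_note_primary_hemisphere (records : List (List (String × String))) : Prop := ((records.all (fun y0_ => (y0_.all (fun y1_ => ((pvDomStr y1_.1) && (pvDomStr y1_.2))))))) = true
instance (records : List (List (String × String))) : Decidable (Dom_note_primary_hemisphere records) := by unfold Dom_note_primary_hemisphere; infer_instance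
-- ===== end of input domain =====

-- B drops Counter and dicts: it scans the hemisphere list and, at each first occurrence,
-- counts that value with list.count keeping a strict-'>' running best; objective: alternative.


-- ===== PORT A =====
-- comprehension: [record.get("primary_hemisphere", "") for record in records if record.get("primary_hemisphere")]
-- (values are strings on this domain, so the truthiness test is 'non-empty string')
-- Counter(...).most_common(1) = stable reverse sort of the counter's items by count, sliced to 1;
-- [0] on that slice cannot raise since hemispheres ≠ [] on that branch (pyGetD's default is unreachable).
def note_primary_hemisphere (records : List (List (String × String))) : String :=
  let hemispheres :=
    (records.filter (fun record =>
        ((PySem.Dict.mk record).getD "primary_hemisphere" "") != "")).map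
      (fun record => (PySem.Dict.mk record).getD "primary_hemisphere" "")
  if hemispheres = [] then "MATH"
  else
    (PySem.List.pyGetD
      ((PySem.List.sorted (PySem.Dict.counter hemispheres).items
          (fun p => p.2) true).take 1)
      0 ("", 0)).1

-- ===== PORT B =====
-- first loop: hems.append(h) for each non-empty h; then
-- for i, h in enumerate(hems): if h not in hems[:i]: c = hems.count(h); if c > best_count: update.
def note_primary_hemisphere_alt (records : List (List (String × String))) : String :=
  let hems := records.foldl (fun hems record =>
      let h := (PySem.Dict.mk record).getD "primary_hemisphere" ""
      if h != "" then hems ++ [h] else hems) []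
  ((PySem.List.enumerate hems).foldl (fun best p =>
      if !((PySem.List.slice hems none (some p.1)).contains p.2) then
        if (PySem.List.count hems p.2 : Int) > best.2 then (p.2, (PySem.List.count hems p.2 : Int))
        else best
      else best)
    ("MATH", (0 : Int))).1

-- ===== PRECONDITION & SPEC =====
def Spec_note_primary_hemisphere (records : List (List (String × String))) (out : String) : Prop := out = note_primary_hemisphere_alt records
instance (records : List (List (String × String))) (out : String) : Decidable (Spec_note_primary_hemisphere records out) := by unfold Spec_note_primary_hemisphere; infer_instance

-- ===== CLAIM (what is proved, stated in full; the proofs are below) =====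
def Claim_equal_note_primary_hemisphere : Prop := ∀ (records : List (List (String × String))), Dom_note_primary_hemisphere records → Spec_note_primary_hemisphere records (note_primary_hemisphere records)

-- ===== LEMMAS AND PROOFS =====

-- the hemisphere list A builds (B's append-fold produces the same list, by PySem.List.foldl_append_if)
def pvHem (records : List (List (String × String))) : List String :=
  (records.filter (fun record =>
      ((PySem.Dict.mk record).getD "primary_hemisphere" "") != "")).map
    (fun record => (PySem.Dict.mk record).getD "primary_hemisphere" "")

-- a fused conditional fold = the unconditional fold over the filtered, mapped list
theorem pv_condfold {A B C : Type} (cond : A → Bool) (g : A → B) (step : C → B → C)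
    (l : List A) (d : C) :
    l.foldl (fun d x => if cond x then step d (g x) else d) d
      = ((l.filter cond).map g).foldl step d := by
  induction l generalizing d with
  | nil => rfl
  | cons x l ih =>
      simp only [List.filter_cons, List.foldl_cons]
      by_cases hc : cond x
      · simp [hc, ih]
      · simp [hc, ih]

-- the first-occurrence positions of hs, in order, are exactly set(hs) (invariant: s and pre have the same members)
theorem pv_enum_set (hs : List String) : ∀ (pre s full : List String), pre ++ hs = full →
    (∀ x, x ∈ s ↔ x ∈ pre) →
    s ++ ((PySem.List.enumerate hs (pre.length : Int)).filter
        (fun p => !((PySem.List.slice full none (some p.1)).contains p.2))).map (·.2)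
      = hs.foldl PySem.Set.add s := by
  induction hs with
  | nil => intro pre s full _ _; simp [PySem.List.enumerate]
  | cons x t ih =>
      intro pre s full hfull hmem
      rw [PySem.List.enumerate_cons]
      have hsl : PySem.List.slice full none (some (pre.length : Int)) = pre := by
        rw [PySem.List.slice_to_natCast, ← hfull, List.take_left]
      have hadd : PySem.Set.add s x = if x ∈ s then s else s ++ [x] := by
        simp [PySem.Set.add]
      have hstep : ((pre.length : Int) + 1) = (((pre ++ [x]).length : Nat) : Int) := by
        simp
      have hfull' : (pre ++ [x]) ++ t = full := by simp [← hfull]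
      simp only [List.filter_cons, List.foldl_cons, hsl]
      by_cases hx : x ∈ pre
      · have hxs : x ∈ s := (hmem x).mpr hx
        have : (!pre.contains x) = false := by simp [hx]
        rw [this, hadd, if_pos hxs, hstep]
        exact ih (pre ++ [x]) s full hfull' (fun y => by
          rw [hmem y, List.mem_append]
          constructor
          · exact Or.inl
          · rintro (h | h)
            · exact h
            · simp at h; exact h ▸ hx)
      · have hxs : x ∉ s := fun h => hx ((hmem x).mp h)
        have : (!pre.contains x) = true := by simp [hx]
        rw [this, hadd, if_neg hxs, hstep]
        simp only [if_true, List.map_cons]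
        rw [show s ++ x :: ((PySem.List.enumerate t ((pre ++ [x]).length : Int)).filter
              (fun p => !((PySem.List.slice full none (some p.1)).contains p.2))).map (·.2)
            = (s ++ [x]) ++ ((PySem.List.enumerate t ((pre ++ [x]).length : Int)).filter
              (fun p => !((PySem.List.slice full none (some p.1)).contains p.2))).map (·.2)
          from by simp]
        exact ih (pre ++ [x]) (s ++ [x]) full hfull' (fun y => by
          simp [hmem y])

-- B's scan over hems = the argmax fold over Counter(hems).items, from ("MATH", 0)
theorem pv_B_items (hs : List String) :
    ((PySem.List.enumerate hs).foldl (fun best p =>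
        if !((PySem.List.slice hs none (some p.1)).contains p.2) then
          if (PySem.List.count hs p.2 : Int) > best.2 then (p.2, (PySem.List.count hs p.2 : Int))
          else best
        else best)
      ("MATH", (0 : Int))).1
    = ((PySem.Dict.counter hs).items.foldl
        (fun best p => if p.2 > best.2 then p else best) ("MATH", (0 : Int))).1 := by
  have h1 := pv_condfold
    (fun p : Int × String => !((PySem.List.slice hs none (some p.1)).contains p.2))
    (fun p : Int × String => (p.2, (PySem.List.count hs p.2 : Int)))
    (fun best q : String × Int => if q.2 > best.2 then q else best)
    (PySem.List.enumerate hs) ("MATH", (0 : Int))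
  have h2 := pv_enum_set hs [] [] hs (by simp) (by simp)
  simp only [List.nil_append, List.length_nil, Nat.cast_zero] at h2
  have h3 : ((PySem.List.enumerate hs).filter
        (fun p => !((PySem.List.slice hs none (some p.1)).contains p.2))).map
        (fun p : Int × String => (p.2, (PySem.List.count hs p.2 : Int)))
      = (PySem.Dict.counter hs).items := by
    rw [show (fun p : Int × String => (p.2, (PySem.List.count hs p.2 : Int)))
        = (fun k : String => (k, (PySem.List.count hs k : Int))) ∘ (fun p : Int × String => p.2)
      from rfl]
    rw [← List.map_map, h2, ← PySem.Set.ofList_eq_foldl, PySem.Dict.items_counter]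
    simp [PySem.List.count_eq]
  rw [h1, h3]

-- head of inserting into a reverse-sorted accumulator is the argmax step
theorem pv_insertBy_head (x hd : String × Int) (tl : List (String × Int)) :
    ∃ tl', PySem.List.insertBy (fun a b : String × Int => decide (b.2 < a.2)) x (hd :: tl)
      = (if hd.2 < x.2 then x else hd) :: tl' := by
  by_cases h : hd.2 < x.2
  · exact ⟨hd :: tl, by simp [PySem.List.insertBy, h]⟩
  · exact ⟨PySem.List.insertBy (fun a b : String × Int => decide (b.2 < a.2)) x tl,
      by simp [PySem.List.insertBy, h]⟩

-- the insertion-sort fold keeps the first maximal element at the head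
theorem pv_foldl_insertBy_head (l : List (String × Int)) :
    ∀ (hd : String × Int) (tl : List (String × Int)),
    ∃ tl', l.foldl (fun acc x =>
            PySem.List.insertBy (fun a b : String × Int => decide (b.2 < a.2)) x acc) (hd :: tl)
      = (l.foldl (fun m x => if m.2 < x.2 then x else m) hd) :: tl' := by
  induction l with
  | nil => exact fun hd tl => ⟨tl, rfl⟩
  | cons x l ih =>
      intro hd tl
      obtain ⟨tl', h1⟩ := pv_insertBy_head x hd tl
      simp only [List.foldl_cons, h1]
      exact ih _ tl'

-- common argmax over the counter items, as A computes it
theorem pv_sorted_head (m : String × Int) (t : List (String × Int)) :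
    (PySem.List.pyGetD
        ((PySem.List.sorted (m :: t) (fun p : String × Int => p.2) true).take 1)
        0 ("", 0)).1
      = (t.foldl (fun best p => if p.2 > best.2 then p else best) m).1 := by
  rw [PySem.List.sorted_rev_eq_foldl_insertBy]
  simp only [List.foldl_cons]
  have h1 : PySem.List.insertBy (fun a b : String × Int => decide (b.2 < a.2)) m
      ([] : List (String × Int)) = [m] := rfl
  rw [h1]
  obtain ⟨tl', h2⟩ := pv_foldl_insertBy_head t m []
  rw [h2]
  simp [PySem.List.pyGetD, PySem.List.pyGet?, PySem.List.pyIdx?, GT.gt]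

-- ===== VERDICT (by name: the statement is the Claim_ definition above) =====
theorem note_primary_hemisphere_spec : Claim_equal_note_primary_hemisphere := by
  intro records _
  show note_primary_hemisphere records = note_primary_hemisphere_alt records
  have hA : note_primary_hemisphere records =
      if pvHem records = [] then "MATH" else
        (PySem.List.pyGetD
          ((PySem.List.sorted (PySem.Dict.counter (pvHem records)).items
              (fun p => p.2) true).take 1)
          0 ("", 0)).1 := rfl
  have hhem : records.foldl (fun hems record =>
      let h := (PySem.Dict.mk record).getD "primary_hemisphere" ""
      if h != "" then hems ++ [h] else hems) []
      = pvHem records :=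
    PySem.List.foldl_append_if
      (fun record => ((PySem.Dict.mk record).getD "primary_hemisphere" "") != "")
      (fun record => (PySem.Dict.mk record).getD "primary_hemisphere" "") records []
  have hB : note_primary_hemisphere_alt records =
      ((PySem.Dict.counter (pvHem records)).items.foldl
        (fun best p => if p.2 > best.2 then p else best) ("MATH", (0 : Int))).1 := by
    show ((PySem.List.enumerate (records.foldl (fun hems record =>
          let h := (PySem.Dict.mk record).getD "primary_hemisphere" ""
          if h != "" then hems ++ [h] else hems) [])).foldl _ ("MATH", (0 : Int))).1 = _
    rw [hhem]
    exact pv_B_items (pvHem records)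
  rw [hA, hB]
  cases hh : pvHem records with
  | nil => rfl
  | cons h hs =>
      rw [if_neg (by simp : ¬ (h :: hs : List String) = [])]
      cases hi : (PySem.Dict.counter (h :: hs)).items with
      | nil =>
          exfalso
          have := PySem.Dict.items_counter (h :: hs)
          rw [hi] at this
          have hmem : h ∈ PySem.Set.ofList (h :: hs) :=
            (PySem.Set.mem_ofList (h :: hs) h).mpr (by simp)
          rcases hx : PySem.Set.ofList (h :: hs) with _ | ⟨a, b⟩
          · rw [hx] at hmem; simp at hmem
          · rw [hx] at this; simp at this
      | cons m t =>
          have hm1 : m.1 ∈ (h :: hs : List String) := by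
            have := PySem.Dict.items_counter (h :: hs)
            rw [hi] at this
            have : m ∈ (PySem.Set.ofList (h :: hs)).map
                (fun k => (k, (List.count k (h :: hs) : Int))) := by rw [← this]; simp
            obtain ⟨k, hk, hkm⟩ := List.mem_map.mp this
            rw [← hkm]
            exact (PySem.Set.mem_ofList (h :: hs) k).mp hk
          have hm2 : (0 : Int) < m.2 := by
            have := PySem.Dict.items_counter (h :: hs)
            rw [hi] at this
            have hmem : m ∈ (PySem.Set.ofList (h :: hs)).map
                (fun k => (k, (List.count k (h :: hs) : Int))) := by rw [← this]; simp
            obtain ⟨k, hk, hkm⟩ := List.mem_map.mp hmem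
            have hkmem : k ∈ (h :: hs : List String) := (PySem.Set.mem_ofList (h :: hs) k).mp hk
            have : 0 < List.count k (h :: hs) := List.count_pos_iff.mpr hkmem
            rw [← hkm]
            show (0:Int) < ((List.count k (h :: hs) : Nat) : Int)
            exact_mod_cast this
          have hfirst : ((m :: t).foldl
              (fun best p => if p.2 > best.2 then p else best) ("MATH", (0 : Int)))
              = t.foldl (fun best p => if p.2 > best.2 then p else best) m := by
            simp only [List.foldl_cons]
            rw [if_pos (by exact hm2)]
          rw [hfirst]
          exact pv_sorted_head m t
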